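-- pv_equiv track=rewrite | github.com/Yetocome/Networking-Algorithm | s2_vs_chord/s2.py | helper_find_smallest_pair
-- ===== SOURCE A (Python) =====
-- def helper_find_smallest_pair(l, n):
--     """helper function to find the smallest difference in a sorted list
--
--     return: the index pair
--     """
--     r1 = n-1
--     r2 = 0
--     diff = min(l[r1][1]-l[r2][1], 1+l[r2][1]-l[r1][1])
--     for i in range(n-1):
--         new_diff = min(diff, l[i+1][1]-l[i][1])
--         if new_diff != diff:
--             r1 = i
--             r2 = i+1
--             diff = new_diff
--     return (r1, r1)
-- ===== SOURCE B (Python) =====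
-- def helper_find_smallest_pair(l, n):
--     """Divide-and-conquer: find the (first-index) minimal adjacent difference over
--     gap indices [0, n-1) by recursive halving, then compare it with the wrap-around
--     difference; strictly smaller wins, otherwise index n-1."""
--     wrap = min(l[n-1][1] - l[0][1], 1 + l[0][1] - l[n-1][1])
--
--     def best(lo, hi):
--         # (diff, index) of the minimal adjacent difference over gap indices [lo, hi),
--         # earliest index on ties; None on an empty range
--         if hi - lo <= 0:
--             return None
--         if hi - lo == 1:
--             return (l[lo+1][1] - l[lo][1], lo)
--         mid = (lo + hi) // 2
--         a = best(lo, mid)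
--         b = best(mid, hi)
--         if a is None:
--             return b
--         if b is None:
--             return a
--         return a if a[0] <= b[0] else b
--
--     b = best(0, n - 1)
--     if b is not None and b[0] < wrap:
--         return (b[1], b[1])
--     return (n - 1, n - 1)
-- ===== Notes on version B (the rewrite author's own statement) =====
-- stated objective: alternative
-- what changed: Replaces A's single stateful left-to-right scan (running diff with change detection) by a divide-and-conquer recursion that halves the gap-index range and merges (diff,index) candidates with a left-biased tie rule, comparing the overall winner against the wrap-around difference at the end.
import Mathlib
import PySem

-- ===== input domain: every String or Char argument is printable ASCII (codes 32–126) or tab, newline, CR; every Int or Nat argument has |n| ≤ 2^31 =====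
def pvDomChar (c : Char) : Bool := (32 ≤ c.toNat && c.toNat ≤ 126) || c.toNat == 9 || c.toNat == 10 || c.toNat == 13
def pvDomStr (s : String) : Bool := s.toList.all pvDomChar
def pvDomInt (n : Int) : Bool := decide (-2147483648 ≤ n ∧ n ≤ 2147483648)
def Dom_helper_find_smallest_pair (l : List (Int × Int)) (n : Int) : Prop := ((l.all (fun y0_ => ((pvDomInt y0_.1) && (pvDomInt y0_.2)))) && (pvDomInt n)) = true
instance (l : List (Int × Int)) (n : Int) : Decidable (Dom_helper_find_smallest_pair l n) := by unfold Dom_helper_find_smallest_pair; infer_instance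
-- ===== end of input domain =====

-- B replaces A's stateful left-to-right scan by a divide-and-conquer recursion over the gap-index range
-- (merge (diff,index) candidates, left-biased on ties, then compare against the wrap-around difference): alternative, same O(n).


-- ===== PORT A =====
-- l[i][1] ; Pre_ guarantees every access is in range, so the .getD default is never reached
def pvVal (l : List (Int × Int)) (i : Int) : Int := ((PySem.List.pyGet? l i).getD (0, 0)).2

def helper_find_smallest_pair (l : List (Int × Int)) (n : Int) : Int × Int :=
  let r1 : Int := n - 1
  let r2 : Int := 0
  let diff : Int := min (pvVal l r1 - pvVal l r2) (1 + pvVal l r2 - pvVal l r1)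
  let st := (PySem.List.pyRange 0 (n - 1) 1).foldl
    (fun (st : Int × Int × Int) (i : Int) =>
      let new_diff := min st.2.2 (pvVal l (i + 1) - pvVal l i)
      if new_diff ≠ st.2.2 then (i, i + 1, new_diff) else st)
    (r1, r2, diff)
  (st.1, st.1)

-- ===== PORT B =====
-- merge of two optional (diff, index) candidates; ties go to the left operand (Source B's 'a if a[0] <= b[0] else b')
def pvCombine (a b : Option (Int × Int)) : Option (Int × Int) :=
  match a, b with
  | none, b => b
  | some a, none => some a
  | some a, some b => if a.1 ≤ b.1 then some a else some b

-- Source B's 'best(lo, hi)': divide-and-conquer over the gap-index range [lo, hi);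
-- 'fuel' is only a structural totality guard (fuel = gap count suffices, each half is strictly smaller)
def pvBest (l : List (Int × Int)) : Nat → Int → Int → Option (Int × Int)
  | 0, _, _ => none
  | fuel + 1, lo, hi =>
    if hi - lo ≤ 0 then none
    else if hi - lo = 1 then some (pvVal l (lo + 1) - pvVal l lo, lo)
    else
      let mid := PySem.Int.floordiv (lo + hi) 2
      pvCombine (pvBest l fuel lo mid) (pvBest l fuel mid hi)

def helper_find_smallest_pair_alt (l : List (Int × Int)) (n : Int) : Int × Int :=
  let wrap : Int := min (pvVal l (n - 1) - pvVal l 0) (1 + pvVal l 0 - pvVal l (n - 1))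
  match pvBest l (n - 1).toNat 0 (n - 1) with
  | some (d, i) => if d < wrap then (i, i) else (n - 1, n - 1)
  | none => (n - 1, n - 1)

-- ===== PRECONDITION & SPEC =====
-- exactly the inputs where A's subscripts l[n-1], l[0], l[i], l[i+1] all succeed (negative indexing included)
def Pre_helper_find_smallest_pair (l : List (Int × Int)) (n : Int) : Prop :=
  n ≤ (l.length : Int) ∧ -(l.length : Int) ≤ n - 1
instance (l : List (Int × Int)) (n : Int) : Decidable (Pre_helper_find_smallest_pair l n) := by
  unfold Pre_helper_find_smallest_pair; infer_instance
def pvWitness_helper_find_smallest_pair : (List (Int × Int)) × Int := ([(0, 0), (1, 1), (2, 3)], 3)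
def Spec_helper_find_smallest_pair (l : List (Int × Int)) (n : Int) (out : Int × Int) : Prop := out = helper_find_smallest_pair_alt l n
instance (l : List (Int × Int)) (n : Int) (out : Int × Int) : Decidable (Spec_helper_find_smallest_pair l n out) := by unfold Spec_helper_find_smallest_pair; infer_instance

-- ===== CLAIM (what is proved, stated in full; the proofs are below) =====
def Claim_equal_helper_find_smallest_pair : Prop := ∀ (l : List (Int × Int)) (n : Int), Dom_helper_find_smallest_pair l n → Pre_helper_find_smallest_pair l n → Spec_helper_find_smallest_pair l n (helper_find_smallest_pair l n)

-- ===== LEMMAS AND PROOFS =====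

-- the one-step body of A's loop, abstracted over the per-index difference g i
def pvStep (g : Int → Int) (st : Int × Int × Int) (i : Int) : Int × Int × Int :=
  let new_diff := min st.2.2 (g i)
  if new_diff ≠ st.2.2 then (i, i + 1, new_diff) else st

-- proof-only linear reference: leftmost minimal (diff, index) candidate of a list
def pvBestList : List (Int × Int) → Option (Int × Int)
  | [] => none
  | x :: xs => pvCombine (some x) (pvBestList xs)

lemma pvCombine_assoc (a b c : Option (Int × Int)) :
    pvCombine (pvCombine a b) c = pvCombine a (pvCombine b c) := by
  cases a with
  | none => rfl
  | some a =>
    cases b with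
    | none => rfl
    | some b =>
      cases c with
      | none => simp only [pvCombine]; split_ifs <;> rfl
      | some c =>
        rcases le_or_gt a.1 b.1 with h1 | h1 <;> rcases le_or_gt b.1 c.1 with h2 | h2
        · simp [pvCombine, h1, h2, le_trans h1 h2]
        · simp [pvCombine, h1, not_le.mpr h2]
        · simp [pvCombine, not_le.mpr h1, h2]
        · have h3 : ¬ a.1 ≤ c.1 := by omega
          simp [pvCombine, not_le.mpr h1, not_le.mpr h2, h3]

lemma pvBestList_append (xs ys : List (Int × Int)) :
    pvBestList (xs ++ ys) = pvCombine (pvBestList xs) (pvBestList ys) := by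
  induction xs with
  | nil => rfl
  | cons x xs ih =>
    simp only [List.cons_append, pvBestList, ih, ← pvCombine_assoc]

def pvGaps (l : List (Int × Int)) (lo hi : Int) : List (Int × Int) :=
  (PySem.List.pyRange lo hi 1).map (fun i => (pvVal l (i + 1) - pvVal l i, i))

-- B's divide-and-conquer computes the linear reference on the gap list
lemma pvBest_eq_bestList (l : List (Int × Int)) : ∀ (fuel : Nat) (lo hi : Int),
    (hi - lo).toNat ≤ fuel → pvBest l fuel lo hi = pvBestList (pvGaps l lo hi) := by
  intro fuel
  induction fuel with
  | zero =>
    intro lo hi hk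
    rw [pvGaps, PySem.List.pyRange_one_eq_nil (by omega)]
    rfl
  | succ fuel ih =>
    intro lo hi hk
    rw [pvBest]
    by_cases h0 : hi - lo ≤ 0
    · rw [if_pos h0, pvGaps, PySem.List.pyRange_one_eq_nil (by omega)]; rfl
    · rw [if_neg h0]
      by_cases h1 : hi - lo = 1
      · rw [if_pos h1, pvGaps,
          show hi = lo + 1 by omega, PySem.List.pyRange_one_singleton]
        rfl
      · rw [if_neg h1]
        have hdv : PySem.Int.floordiv (lo + hi) 2 = (lo + hi) / 2 :=
          PySem.Int.floordiv_eq_ediv_of_pos (by omega)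
        show pvCombine (pvBest l fuel lo (PySem.Int.floordiv (lo + hi) 2))
              (pvBest l fuel (PySem.Int.floordiv (lo + hi) 2) hi) = pvBestList (pvGaps l lo hi)
        rw [hdv]
        have hlm : lo < (lo + hi) / 2 := by omega
        have hmh : (lo + hi) / 2 < hi := by omega
        rw [ih lo ((lo + hi) / 2) (by omega), ih ((lo + hi) / 2) hi (by omega)]
        simp only [pvGaps]
        rw [PySem.List.pyRange_one_append lo ((lo + hi) / 2) hi (by omega) (by omega),
            List.map_append, pvBestList_append]

-- characterisation of A's loop: first component = leftmost minimal gap index when its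
-- difference beats the initial diff strictly, else the initial r1
lemma pv_key (g : Int → Int) : ∀ (k : Nat) (a r0 r2 w : Int),
    ((PySem.List.pyRange a (a + (k : Int)) 1).foldl (pvStep g) (r0, r2, w)).1 =
      (match pvBestList ((PySem.List.pyRange a (a + (k : Int)) 1).map (fun i => (g i, i))) with
       | none => r0
       | some (d, i) => if d < w then i else r0) := by
  intro k
  induction k with
  | zero =>
    intro a r0 r2 w
    rw [PySem.List.pyRange_one_eq_nil (by omega)]
    rfl
  | succ k ih =>
    intro a r0 r2 w
    have hcons : PySem.List.pyRange a (a + ((k + 1 : Nat) : Int)) 1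
        = a :: PySem.List.pyRange (a + 1) ((a + 1) + (k : Int)) 1 := by
      rw [PySem.List.pyRange_one_cons (by push_cast; omega)]
      congr 1
      push_cast
      ring_nf
    rw [hcons]
    simp only [List.foldl, List.map, pvBestList]
    by_cases hga : g a < w
    · have hstep : pvStep g (r0, r2, w) a = (a, a + 1, g a) := by
        simp only [pvStep]
        rw [min_eq_right (le_of_lt hga)]
        simp [ne_of_lt hga]
      rw [hstep, ih (a + 1) a (a + 1) (g a)]
      cases hbr : pvBestList ((PySem.List.pyRange (a + 1) ((a + 1) + (k : Int)) 1).map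
          (fun i => (g i, i))) with
      | none => simp [pvCombine, hga]
      | some p =>
        obtain ⟨d, i⟩ := p
        simp only [pvCombine]
        by_cases hle : g a ≤ d
        · rw [if_pos hle]
          have : ¬ d < g a := not_lt.mpr hle
          simp [this, hga]
        · rw [if_neg hle]
          have h1 : d < g a := not_le.mp hle
          have h2 : d < w := lt_trans h1 hga
          simp [h1, h2]
    · have hstep : pvStep g (r0, r2, w) a = (r0, r2, w) := by
        simp only [pvStep]
        rw [min_eq_left (not_lt.mp hga)]
        simp
      rw [hstep, ih (a + 1) r0 r2 w]
      cases hbr : pvBestList ((PySem.List.pyRange (a + 1) ((a + 1) + (k : Int)) 1).map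
          (fun i => (g i, i))) with
      | none => simp [pvCombine, hga]
      | some p =>
        obtain ⟨d, i⟩ := p
        simp only [pvCombine]
        by_cases hle : g a ≤ d
        · rw [if_pos hle]
          have h1 : ¬ g a < w := hga
          have h2 : ¬ d < w := fun h => hga (lt_of_le_of_lt hle h)
          simp [h1, h2]
        · rw [if_neg hle]

-- A's loop result, phrased on the actual range and gap list (wrapper around pv_key)
lemma pvA_fold (l : List (Int × Int)) (n w : Int) (hn : 0 ≤ n - 1) :
    ((PySem.List.pyRange 0 (n - 1) 1).foldl
        (pvStep (fun i => pvVal l (i + 1) - pvVal l i)) (n - 1, 0, w)).1 =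
      (match pvBestList (pvGaps l 0 (n - 1)) with
       | none => n - 1
       | some (d, i) => if d < w then i else n - 1) := by
  have h := pv_key (fun i => pvVal l (i + 1) - pvVal l i) (n - 1).toNat 0 (n - 1) 0 w
  have he : (0 : Int) + (((n - 1).toNat : Nat) : Int) = n - 1 := by omega
  rw [he] at h
  simpa [pvGaps] using h

-- ===== VERDICT (by name: the statement is the Claim_ definition above) =====
theorem helper_find_smallest_pair_spec : Claim_equal_helper_find_smallest_pair := by
  intro l n _ _
  unfold Spec_helper_find_smallest_pair helper_find_smallest_pair helper_find_smallest_pair_alt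
  simp only []
  rw [show (fun (st : Int × Int × Int) (i : Int) =>
        if min st.2.2 (pvVal l (i + 1) - pvVal l i) ≠ st.2.2 then
          (i, i + 1, min st.2.2 (pvVal l (i + 1) - pvVal l i))
        else st) = pvStep (fun i => pvVal l (i + 1) - pvVal l i) from rfl]
  set w : Int := min (pvVal l (n - 1) - pvVal l 0) (1 + pvVal l 0 - pvVal l (n - 1)) with hw
  by_cases hn : 0 ≤ n - 1
  · rw [pvA_fold l n w hn, pvBest_eq_bestList l (n - 1).toNat 0 (n - 1) (by omega)]
    cases pvBestList (pvGaps l 0 (n - 1)) with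
    | none => rfl
    | some p =>
      obtain ⟨d, i⟩ := p
      by_cases hd : d < w <;> simp [hd]
  · rw [PySem.List.pyRange_one_eq_nil (by omega),
        show (n - 1).toNat = 0 by omega]
    rfl
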